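-- pv_equiv track=rewrite | github.com/jaimejaramilloarias/GeneradorMontunos | GeneradorMontunos/midi_utils_tradicional.py | _ajustar_salto
-- ===== SOURCE A (Python) =====
-- def _ajustar_salto(prev_pitch: int | None, pitch: int) -> int:
--     """Return ``pitch`` transposed by octaves so the leap from ``prev_pitch``
--     is less than an octave."""
--
--     if prev_pitch is None:
--         return pitch
--     while pitch - prev_pitch >= 12:
--         pitch -= 12
--     while prev_pitch - pitch >= 12:
--         pitch += 12
--     return pitch
-- ===== SOURCE B (Python) =====
-- def _ajustar_salto(prev_pitch, pitch):
--     """Closed-form: reduce the leap mod 12 keeping its sign; no loops."""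
--     if prev_pitch is None:
--         return pitch
--     d = pitch - prev_pitch
--     r = d % 12 if d >= 0 else -((-d) % 12)
--     return prev_pitch + r
-- ===== Notes on version B (the rewrite author's own statement) =====
-- stated objective: simpler
-- what changed: Replaces the two octave-subtracting/adding while loops with one closed-form modular reduction of the leap (d % 12 with the leap's sign reattached).
import Mathlib
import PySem

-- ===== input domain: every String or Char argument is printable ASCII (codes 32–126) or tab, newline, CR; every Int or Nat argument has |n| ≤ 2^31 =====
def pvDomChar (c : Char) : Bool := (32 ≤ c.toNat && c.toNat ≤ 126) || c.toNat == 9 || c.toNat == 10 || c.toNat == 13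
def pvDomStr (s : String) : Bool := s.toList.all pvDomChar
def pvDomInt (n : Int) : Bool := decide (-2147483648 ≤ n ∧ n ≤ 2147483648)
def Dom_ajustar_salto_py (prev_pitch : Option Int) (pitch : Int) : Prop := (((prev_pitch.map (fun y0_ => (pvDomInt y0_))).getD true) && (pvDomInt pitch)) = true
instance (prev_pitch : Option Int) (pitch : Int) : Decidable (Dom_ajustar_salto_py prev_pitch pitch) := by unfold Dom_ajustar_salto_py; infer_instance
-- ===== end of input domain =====

-- B replaces A's octave-stepping while loops with a single closed-form mod-12 reduction of the leap (simpler, no loops).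
-- ===== PORT A =====
-- while pitch - prev_pitch >= 12: pitch -= 12
def ajustarLoopDown (prev pitch : Int) : Int :=
  if pitch - prev ≥ 12 then ajustarLoopDown prev (pitch - 12) else pitch
termination_by (pitch - prev).toNat
decreasing_by omega

-- while prev_pitch - pitch >= 12: pitch += 12
def ajustarLoopUp (prev pitch : Int) : Int :=
  if prev - pitch ≥ 12 then ajustarLoopUp prev (pitch + 12) else pitch
termination_by (prev - pitch).toNat
decreasing_by omega

def ajustar_salto_py (prev_pitch : Option Int) (pitch : Int) : Int :=
  match prev_pitch with
  | none => pitch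
  | some prev => ajustarLoopUp prev (ajustarLoopDown prev pitch)

-- ===== PORT B =====
def ajustar_salto_py_alt (prev_pitch : Option Int) (pitch : Int) : Int :=
  match prev_pitch with
  | none => pitch
  | some prev =>
    let d := pitch - prev
    let r := if d ≥ 0 then PySem.Int.mod d 12 else -(PySem.Int.mod (-d) 12)
    prev + r

-- ===== PRECONDITION & SPEC =====
def Spec_ajustar_salto_py (prev_pitch : Option Int) (pitch : Int) (out : Int) : Prop := out = ajustar_salto_py_alt prev_pitch pitch
instance (prev_pitch : Option Int) (pitch : Int) (out : Int) : Decidable (Spec_ajustar_salto_py prev_pitch pitch out) := by unfold Spec_ajustar_salto_py; infer_instance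

-- ===== CLAIM (what is proved, stated in full; the proofs are below) =====
def Claim_equal_ajustar_salto_py : Prop := ∀ (prev_pitch : Option Int) (pitch : Int), Dom_ajustar_salto_py prev_pitch pitch → Spec_ajustar_salto_py prev_pitch pitch (ajustar_salto_py prev_pitch pitch)

-- ===== LEMMAS AND PROOFS =====

lemma ajustarLoopDown_eq (prev pitch : Int) (h : pitch - prev ≥ 0) :
    ajustarLoopDown prev pitch = prev + (pitch - prev) % 12 := by
  fun_induction ajustarLoopDown prev pitch with
  | case1 pitch hge ih =>
    rw [ih (by omega)]; omega
  | case2 pitch hlt => omega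

lemma ajustarLoopDown_neg (prev pitch : Int) (h : pitch - prev < 12) :
    ajustarLoopDown prev pitch = pitch := by
  rw [ajustarLoopDown, if_neg (by omega)]

lemma ajustarLoopUp_eq (prev pitch : Int) (h : prev - pitch ≥ 0) :
    ajustarLoopUp prev pitch = prev - (prev - pitch) % 12 := by
  fun_induction ajustarLoopUp prev pitch with
  | case1 pitch hge ih =>
    rw [ih (by omega)]; omega
  | case2 pitch hlt => omega

lemma ajustarLoopUp_neg (prev pitch : Int) (h : prev - pitch < 12) :
    ajustarLoopUp prev pitch = pitch := by
  rw [ajustarLoopUp, if_neg (by omega)]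

-- ===== VERDICT (by name: the statement is the Claim_ definition above) =====
theorem ajustar_salto_py_spec : Claim_equal_ajustar_salto_py := by
  intro prev_pitch pitch _
  unfold Spec_ajustar_salto_py
  cases prev_pitch with
  | none => rfl
  | some prev =>
    simp only [ajustar_salto_py, ajustar_salto_py_alt,
      PySem.Int.mod_eq_emod_of_pos (by norm_num : (0:Int) < 12)]
    by_cases h : pitch - prev ≥ 0
    · rw [ajustarLoopDown_eq prev pitch h,
        ajustarLoopUp_neg prev _ (by omega)]
      simp only [if_pos h]
    · rw [ajustarLoopDown_neg prev pitch (by omega),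
        ajustarLoopUp_eq prev pitch (by omega)]
      simp only [if_neg h]
      omega
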